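-- pv_equiv track=rewrite | github.com/amolparande-tomtom/addressranges | hnrAdressRangesArrayFormation_V1.py | Old_correct_hnr_array
-- ===== SOURCE A (Python) =====
-- def Old_correct_hnr_array(arr):
--     corrected_arr = []
--     for item in arr:
--         if ';' in item:
--             corrected_arr.extend(item.split(';'))
--         else:
--             corrected_arr.append(item)
--     return corrected_arr
-- ===== SOURCE B (Python) =====
-- def Old_correct_hnr_array(arr):
--     # Join everything with ';' and split once: one string-level pass instead of
--     # a branchy per-item append/extend loop. ''.split(';') would give [''],
--     # so the empty input is returned as-is.
--     return ';'.join(arr).split(';') if arr else []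
-- ===== Notes on version B (the rewrite author's own statement) =====
-- stated objective: idiomatic
-- what changed: Replaces the per-item branch-and-extend loop by a single join-then-split over one flattened string, with an explicit empty-list guard.
import Mathlib
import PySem

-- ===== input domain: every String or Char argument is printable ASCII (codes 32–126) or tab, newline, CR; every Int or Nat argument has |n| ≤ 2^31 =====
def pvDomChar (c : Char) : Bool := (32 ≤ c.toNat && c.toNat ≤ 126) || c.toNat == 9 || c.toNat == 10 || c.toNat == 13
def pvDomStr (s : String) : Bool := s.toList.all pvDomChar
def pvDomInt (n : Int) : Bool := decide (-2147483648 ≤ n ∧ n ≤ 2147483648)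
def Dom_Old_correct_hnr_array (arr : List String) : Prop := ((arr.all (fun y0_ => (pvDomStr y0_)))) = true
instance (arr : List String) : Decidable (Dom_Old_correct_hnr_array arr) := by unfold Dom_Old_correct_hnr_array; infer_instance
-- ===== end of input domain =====

-- B replaces A's per-item branch-and-extend loop by one join-then-split pass
-- (';'.join(arr).split(';'), with an explicit guard for the empty list); same result, idiomatic.

-- ===== PORT A =====
def Old_correct_hnr_array (arr : List String) : List String :=
  arr.foldl (fun corrected_arr item =>
    if PySem.Str.isIn ";" item then
      corrected_arr ++ (PySem.Str.split? item ";").getD []   -- sep ";" ≠ "": split? is always `some` here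
    else
      corrected_arr ++ [item]) []

-- ===== PORT B =====
def Old_correct_hnr_array_alt (arr : List String) : List String :=
  if arr ≠ [] then (PySem.Str.split? (PySem.Str.join ";" arr) ";").getD []   -- sep ";" ≠ "": always `some`
  else []

-- ===== PRECONDITION & SPEC =====
def Spec_Old_correct_hnr_array (arr : List String) (out : List String) : Prop := out = Old_correct_hnr_array_alt arr
instance (arr : List String) (out : List String) : Decidable (Spec_Old_correct_hnr_array arr out) := by unfold Spec_Old_correct_hnr_array; infer_instance

-- ===== CLAIM (what is proved, stated in full; the proofs are below) =====
def Claim_equal_Old_correct_hnr_array : Prop := ∀ (arr : List String), Dom_Old_correct_hnr_array arr → Spec_Old_correct_hnr_array arr (Old_correct_hnr_array arr)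

-- ===== LEMMAS AND PROOFS =====

-- the split predicate: Python's `s.split(';')` splits on this character
def pvSemi : Char → Bool := fun c => c == ';'

-- PySem's fuelled splitOn.go computes List.splitOnP, with the pending chunk `cur` prepended to the first piece
theorem pv_go (fuel : Nat) : ∀ (l cur : List Char) (acc : List (List Char)), l.length < fuel →
    PySem.Chars.splitOn.go [';'] fuel l cur acc
      = acc.reverse ++ (l.splitOnP pvSemi).modifyHead (fun t => cur.reverse ++ t) := by
  induction fuel with
  | zero => intro l cur acc h; omega
  | succ n ih =>
    intro l cur acc h
    cases l with
    | nil =>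
      rw [PySem.Chars.splitOn.go.eq_def]
      simp [List.splitOnP_nil]
    | cons c rest =>
      rw [PySem.Chars.splitOn.go.eq_def]
      simp only [List.isPrefixOf, Bool.and_true, List.length_cons, List.length_nil,
        List.drop_succ_cons, List.drop_zero]
      by_cases hc : c = ';'
      · subst hc
        rw [if_pos (by simp)]
        rw [ih rest [] (cur.reverse :: acc) (by simp only [List.length_cons] at h; omega)]
        have hid : (fun t : List Char => List.reverse ([] : List Char) ++ t) = id := by
          funext t; simp
        have hp : pvSemi ';' = true := by simp [pvSemi]
        rw [hid, List.modifyHead_id]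
        simp [List.splitOnP_cons, hp]
      · rw [if_neg (by simp only [beq_iff_eq]; exact fun he => hc he.symm)]
        rw [ih rest (c :: cur) acc (by simp only [List.length_cons] at h; omega)]
        have hp : pvSemi c = false := by simp [pvSemi, hc]
        simp only [List.splitOnP_cons, hp, Bool.false_eq_true, if_false,
          List.modifyHead_modifyHead]
        have hfun : (fun t => (c :: cur).reverse ++ t)
            = ((fun t : List Char => cur.reverse ++ t) ∘ List.cons c) := by
          funext t; simp
        rw [hfun]

theorem pv_splitOn_char (l : List Char) : PySem.Chars.splitOn l [';'] = l.splitOnP pvSemi := by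
  unfold PySem.Chars.splitOn
  rw [pv_go (l.length + 1) l [] [] (Nat.lt_succ_self _)]
  have h : (fun t : List Char => List.reverse [] ++ t) = id := by funext t; simp
  rw [h, List.modifyHead_id]
  simp

-- a chunk without ';' is a single piece
theorem pv_single (l : List Char) (h : ';' ∉ l) : l.splitOnP pvSemi = [l] := by
  induction l with
  | nil => simp [List.splitOnP_nil]
  | cons c rest ih =>
    have hc : pvSemi c = false := by
      simp only [pvSemi, beq_eq_false_iff_ne, ne_eq]
      intro he; exact h (he ▸ List.mem_cons_self)
    have hrest : ';' ∉ rest := fun hm => h (List.mem_cons_of_mem _ hm)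
    simp [List.splitOnP_cons, hc, ih hrest]

-- splitting a concatenation at an explicit ';' splits each side independently
theorem pv_append (a b : List Char) :
    (a ++ ';' :: b).splitOnP pvSemi = a.splitOnP pvSemi ++ b.splitOnP pvSemi := by
  induction a with
  | nil => simp [List.splitOnP_nil, List.splitOnP_cons, pvSemi]
  | cons c a ih =>
    by_cases hc : c = ';'
    · subst hc
      simp [List.splitOnP_cons, pvSemi, ih]
    · have hp : pvSemi c = false := by simp [pvSemi, hc]
      simp only [List.cons_append, List.splitOnP_cons, hp, Bool.false_eq_true, if_false, ih]
      cases ha : a.splitOnP pvSemi with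
      | nil => exact absurd ha (List.splitOnP_ne_nil _ _)
      | cons x xs => simp

-- splitting the ';'-join of a nonempty list recovers every piece of every element
theorem pv_join (x : List Char) (xs : List (List Char)) :
    (PySem.Chars.join [';'] (x :: xs)).splitOnP pvSemi
      = (x :: xs).flatMap (fun l => l.splitOnP pvSemi) := by
  induction xs generalizing x with
  | nil => simp [PySem.Chars.join, List.intercalate]
  | cons y ys ih =>
    have hj : PySem.Chars.join [';'] (x :: y :: ys)
        = x ++ ';' :: PySem.Chars.join [';'] (y :: ys) := by
      simp [PySem.Chars.join, List.intercalate]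
    rw [hj, pv_append, ih y]
    simp

-- what splitting one element yields, as strings
def pvPieces (s : String) : List String := (s.toList.splitOnP pvSemi).map String.ofList

theorem pv_split?_eq (s : String) :
    (PySem.Str.split? s ";").getD [] = pvPieces s := by
  simp only [PySem.Str.split?, PySem.Chars.split?, pvPieces]
  rw [show (";" : String).toList = [';'] from rfl]
  simp [pv_splitOn_char]

-- A flattens to the same per-element pieces
theorem pv_A (arr : List String) :
    Old_correct_hnr_array arr = arr.flatMap pvPieces := by
  unfold Old_correct_hnr_array
  have hbody : (fun (acc : List String) (item : String) =>
      if PySem.Str.isIn ";" item then acc ++ (PySem.Str.split? item ";").getD [] else acc ++ [item])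
      = fun acc item => acc ++ (if PySem.Str.isIn ";" item then (PySem.Str.split? item ";").getD [] else [item]) := by
    funext acc item; split <;> rfl
  rw [hbody, PySem.List.foldl_append_eq_flatMap]
  have hg : (fun item => if PySem.Str.isIn ";" item then (PySem.Str.split? item ";").getD [] else [item]) = pvPieces := by
    funext item
    by_cases h : PySem.Str.isIn ";" item
    · rw [if_pos h, pv_split?_eq]
    · rw [if_neg h]
      have hnot : (';' : Char) ∉ item.toList := by
        have := (PySem.Str.isIn_iff_infix ";" item).not.mp h
        rw [show (";" : String).toList = [';'] from rfl] at this
        intro hm; exact this ((List.singleton_infix_iff ';' item.toList).mpr hm)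
      simp [pvPieces, pv_single _ hnot, String.ofList_toList]
  rw [hg, List.nil_append]

theorem pv_B (x : String) (xs : List String) :
    Old_correct_hnr_array_alt (x :: xs) = (x :: xs).flatMap pvPieces := by
  unfold Old_correct_hnr_array_alt
  rw [if_pos (List.cons_ne_nil x xs), pv_split?_eq]
  simp only [pvPieces, PySem.Str.join, String.toList_ofList]
  rw [show (";" : String).toList = [';'] from rfl, show (x :: xs).map String.toList
      = x.toList :: xs.map String.toList from rfl, pv_join]
  simp [pvPieces, List.map_flatMap, List.flatMap_map]
  rfl

-- ===== VERDICT (by name: the statement is the Claim_ definition above) =====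
theorem Old_correct_hnr_array_spec : Claim_equal_Old_correct_hnr_array := by
  intro arr _
  unfold Spec_Old_correct_hnr_array
  rw [pv_A]
  cases arr with
  | nil => rfl
  | cons x xs => rw [pv_B]
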